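-- pv_equiv track=rewrite | github.com/Zer0andZer0/praktika | Praktika9-5variant.py | replace_min_elements
-- ===== SOURCE A (Python) =====
-- def replace_min_elements(matrix):  # Task 2
--     new_matrix = []
--     for row in matrix:
--         min_val = min(row)
--         min_index = row.index(min_val)
--         new_row = row[:]
--         new_row[min_index] = 0 if min_val % 2 == 0 else 1
--         new_matrix.append(new_row)
--     return new_matrix
-- ===== SOURCE B (Python) =====
-- def _argmin(row, lo, hi):
--     # first arg-min of row[lo:hi] by divide-and-conquer tournament (ties: left wins)
--     if hi - lo <= 1:
--         return (row[lo], lo)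
--     mid = (lo + hi) // 2
--     lv, li = _argmin(row, lo, mid)
--     rv, ri = _argmin(row, mid, hi)
--     return (lv, li) if lv <= rv else (rv, ri)
--
--
-- def replace_min_elements(matrix):
--     new_matrix = []
--     for row in matrix:
--         v, i = _argmin(row, 0, len(row))
--         new_matrix.append(row[:i] + [v % 2] + row[i + 1:])
--     return new_matrix
-- ===== Notes on version B (the rewrite author's own statement) =====
-- stated objective: alternative
-- what changed: Per row, the first minimum and its index are found by a divide-and-conquer tournament over index ranges (ties resolved leftwards) instead of min() followed by a second .index() scan, and the row is rebuilt from slices with v % 2 instead of an in-place copy-and-assign.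
import Mathlib
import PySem

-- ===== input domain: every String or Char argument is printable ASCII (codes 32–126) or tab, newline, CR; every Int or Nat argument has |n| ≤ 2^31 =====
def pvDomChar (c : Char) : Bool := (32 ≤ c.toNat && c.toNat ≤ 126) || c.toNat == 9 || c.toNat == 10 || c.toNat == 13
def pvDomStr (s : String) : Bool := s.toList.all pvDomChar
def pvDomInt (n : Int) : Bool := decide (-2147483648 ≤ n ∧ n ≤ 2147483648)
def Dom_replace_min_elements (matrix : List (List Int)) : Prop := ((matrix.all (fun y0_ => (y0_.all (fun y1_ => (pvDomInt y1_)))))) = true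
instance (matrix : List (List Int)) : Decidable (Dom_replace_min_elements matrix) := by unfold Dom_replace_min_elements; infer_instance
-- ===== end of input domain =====

-- B finds each row's first minimum and its index by a divide-and-conquer tournament over index
-- ranges (instead of min() followed by a second .index() scan) and rebuilds the row from slices
-- with v % 2 (objective: alternative algorithm, same asymptotic cost).

-- ===== PORT A =====
-- one row of A: min_val = min(row); min_index = row.index(min_val); new_row = row[:]; new_row[min_index] = 0 if min_val % 2 == 0 else 1
def pvRowA (row : List Int) : List Int :=
  match PySem.List.min? row (fun x => x) with
  | none => []          -- min([]) raises ValueError; excluded by Pre_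
  | some m =>
    match PySem.List.index? row m with
    | none => []        -- unreachable: m ∈ row
    | some i =>
      PySem.List.pySetD row ((i : Nat) : Int) (if PySem.Int.mod m 2 = 0 then 0 else 1)

def replace_min_elements (matrix : List (List Int)) : List (List Int) :=
  matrix.foldl (fun new_matrix row => new_matrix ++ [pvRowA row]) []

-- ===== PORT B =====
-- _argmin(row, lo, hi): first arg-min of row[lo:hi] by tournament; row[lo] is always in range
-- when the row is nonempty (empty rows are excluded by Pre_), so row.getD lo 0 is exact there.
def pvArgmin (row : List Int) (lo hi : Nat) : Int × Nat :=
  if hi ≤ lo + 1 then (row.getD lo 0, lo)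
  else
    let mid := (lo + hi) / 2
    let l := pvArgmin row lo mid
    let r := pvArgmin row mid hi
    if l.1 ≤ r.1 then l else r
termination_by hi - lo
decreasing_by all_goals omega

def replace_min_elements_alt (matrix : List (List Int)) : List (List Int) :=
  matrix.foldl (fun new_matrix row =>
    let p := pvArgmin row 0 row.length
    new_matrix ++ [PySem.List.slice row none (some ((p.2 : Nat) : Int)) ++ [PySem.Int.mod p.1 2]
      ++ PySem.List.slice row (some (((p.2 : Nat) : Int) + 1)) none]) []

-- ===== PRECONDITION & SPEC =====
-- Pre_ excludes matrices containing an empty row: there A raises ValueError (min of empty sequence).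
def Pre_replace_min_elements (matrix : List (List Int)) : Prop :=
  ∀ row ∈ matrix, row ≠ []
instance (matrix : List (List Int)) : Decidable (Pre_replace_min_elements matrix) := by
  unfold Pre_replace_min_elements; infer_instance

def pvWitness_replace_min_elements : List (List Int) := [[3, 1, 1, 4], [-2, -2, 5]]

def Spec_replace_min_elements (matrix : List (List Int)) (out : List (List Int)) : Prop := out = replace_min_elements_alt matrix
instance (matrix : List (List Int)) (out : List (List Int)) : Decidable (Spec_replace_min_elements matrix out) := by unfold Spec_replace_min_elements; infer_instance

-- ===== CLAIM (what is proved, stated in full; the proofs are below) =====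
def Claim_equal_replace_min_elements : Prop := ∀ (matrix : List (List Int)), Dom_replace_min_elements matrix → Pre_replace_min_elements matrix → Spec_replace_min_elements matrix (replace_min_elements matrix)

-- ===== LEMMAS AND PROOFS =====

-- the tournament returns (value, index) of the FIRST minimum of row[lo:hi]
lemma pvArgmin_spec (row : List Int) :
    ∀ (d lo hi : Nat), hi - lo ≤ d → lo < hi → hi ≤ row.length →
      lo ≤ (pvArgmin row lo hi).2 ∧ (pvArgmin row lo hi).2 < hi ∧
      (∃ h : (pvArgmin row lo hi).2 < row.length, row[(pvArgmin row lo hi).2] = (pvArgmin row lo hi).1) ∧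
      (∀ j (hj : j < row.length), lo ≤ j → j < hi → (pvArgmin row lo hi).1 ≤ row[j]) ∧
      (∀ j (hj : j < row.length), lo ≤ j → j < (pvArgmin row lo hi).2 → (pvArgmin row lo hi).1 < row[j]) := by
  intro d
  induction d with
  | zero => intro lo hi h1 h2 _; omega
  | succ d ih =>
    intro lo hi hd hlt hlen
    by_cases hbase : hi ≤ lo + 1
    · have hlolen : lo < row.length := by omega
      rw [pvArgmin, if_pos hbase]
      refine ⟨le_refl _, by omega, ⟨hlolen, (List.getD_eq_getElem row 0 hlolen).symm⟩, ?_, ?_⟩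
      · intro j hj h1 h2
        have : j = lo := by omega
        subst this
        exact le_of_eq (List.getD_eq_getElem row 0 hlolen)
      · intro j hj h1 h2; omega
    · rw [pvArgmin, if_neg hbase]
      have hmid1 : lo < (lo + hi) / 2 := by omega
      have hmid2 : (lo + hi) / 2 < hi := by omega
      obtain ⟨l1, l2, ⟨hl3, hl3'⟩, l4, l5⟩ :=
        ih lo ((lo + hi) / 2) (by omega) hmid1 (by omega)
      obtain ⟨r1, r2, ⟨hr3, hr3'⟩, r4, r5⟩ :=
        ih ((lo + hi) / 2) hi (by omega) hmid2 hlen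
      dsimp only
      by_cases hle : (pvArgmin row lo ((lo + hi) / 2)).1 ≤ (pvArgmin row ((lo + hi) / 2) hi).1
      · rw [if_pos hle]
        refine ⟨l1, by omega, ⟨hl3, hl3'⟩, ?_, ?_⟩
        · intro j hj h1 h2
          by_cases hjm : j < (lo + hi) / 2
          · exact l4 j hj h1 hjm
          · exact le_trans hle (r4 j hj (by omega) h2)
        · intro j hj h1 h2
          exact l5 j hj h1 h2
      · rw [if_neg hle]
        refine ⟨by omega, r2, ⟨hr3, hr3'⟩, ?_, ?_⟩
        · intro j hj h1 h2
          by_cases hjm : j < (lo + hi) / 2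
          · exact le_trans (le_of_lt (lt_of_not_ge hle)) (l4 j hj h1 hjm)
          · exact r4 j hj (by omega) h2
        · intro j hj h1 h2
          by_cases hjm : j < (lo + hi) / 2
          · exact lt_of_lt_of_le (lt_of_not_ge hle) (l4 j hj h1 hjm)
          · exact r5 j hj (by omega) h2

-- list surgery: set at a valid index = take ++ [v] ++ drop
lemma set_eq_take_append_drop (xs : List Int) (n : Nat) (v : Int) (h : n < xs.length) :
    xs.set n v = xs.take n ++ [v] ++ xs.drop (n + 1) := by
  induction xs generalizing n with
  | nil => simp at h
  | cons x xs ih =>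
    cases n with
    | zero => simp
    | succ n =>
      simp only [List.set_cons_succ, List.take_succ_cons, List.drop_succ_cons,
        List.cons_append, List.cons.injEq, true_and]
      exact ih n (by simpa using h)

-- A's in-place assignment equals B's slice rebuild at the same (valid) index
lemma setD_eq_slices (xs : List Int) (n : Nat) (v : Int) (h : n < xs.length) :
    PySem.List.pySetD xs ((n : Nat) : Int) v =
      PySem.List.slice xs none (some ((n : Nat) : Int)) ++ [v]
        ++ PySem.List.slice xs (some (((n : Nat) : Int) + 1)) none := by
  rw [PySem.List.pySetD_natCast,
    PySem.List.slice_to xs (b := ((n : Nat) : Int)) (by exact_mod_cast Int.natCast_nonneg n),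
    show (((n : Nat) : Int) + 1) = (((n + 1 : Nat) : Nat) : Int) by push_cast; ring,
    PySem.List.slice_some_none, PySem.List.clampIdx_natCast]
  rw [Int.toNat_natCast, Nat.min_eq_left (by omega)]
  exact set_eq_take_append_drop xs n v h

-- the row-level equality on nonempty rows
lemma row_eq (row : List Int) (hne : row ≠ []) :
    pvRowA row =
      PySem.List.slice row none (some (((pvArgmin row 0 row.length).2 : Nat) : Int))
        ++ [PySem.Int.mod (pvArgmin row 0 row.length).1 2]
        ++ PySem.List.slice row (some ((((pvArgmin row 0 row.length).2 : Nat) : Int) + 1)) none := by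
  have hpos : 0 < row.length := List.length_pos_of_ne_nil hne
  obtain ⟨-, -, ⟨hilen, hival⟩, hmin, hstrict⟩ :=
    pvArgmin_spec row row.length 0 row.length (by omega) hpos (le_refl _)
  set v := (pvArgmin row 0 row.length).1 with hv
  set i := (pvArgmin row 0 row.length).2 with hi
  -- min? row id = some v
  have hmem : v ∈ row := hival ▸ List.getElem_mem hilen
  obtain ⟨m, hm⟩ : ∃ m, PySem.List.min? row (fun x => x) = some m := by
    cases hmq : PySem.List.min? row (fun x => x) with
    | none => exact absurd ((PySem.List.min?_eq_none_iff _ _).mp hmq) hne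
    | some m => exact ⟨m, rfl⟩
  have hmv : m = v := by
    have h1 : m ≤ v := PySem.List.min?_isMin hm v hmem
    have h2 : v ≤ m := by
      obtain ⟨k, hk, hkv⟩ := List.mem_iff_getElem.mp (PySem.List.min?_mem hm)
      exact hkv ▸ hmin k hk (Nat.zero_le k) hk
    omega
  -- index? row v = some i
  have hidx : PySem.List.index? row v = some i := by
    rw [PySem.List.index?_eq_some_iff]
    refine ⟨row.take i, row.drop (i + 1), ?_, ?_, ?_⟩
    · conv_lhs => rw [← List.take_append_drop i row]
      rw [← List.getElem_cons_drop hilen, hival]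
    · rw [List.length_take]; omega
    · intro hvmem
      obtain ⟨k, hk, hkv⟩ := List.mem_iff_getElem.mp hvmem
      rw [List.getElem_take] at hkv
      have hk' : k < min i row.length := by simpa using hk
      exact absurd hkv.symm
        (ne_of_lt (hstrict k (by omega) (Nat.zero_le k) (by omega)))
  -- parity value
  have hval : (if PySem.Int.mod v 2 = 0 then (0 : Int) else 1) = PySem.Int.mod v 2 := by
    have h0 := PySem.Int.mod_nonneg v (b := 2) (by norm_num)
    have h1 := PySem.Int.mod_lt v (b := 2) (by norm_num)
    by_cases hz : PySem.Int.mod v 2 = 0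
    · rw [if_pos hz, hz]
    · rw [if_neg hz]; omega
  unfold pvRowA
  rw [hm, hmv]
  dsimp only
  rw [hidx]
  dsimp only
  rw [hval]
  exact setD_eq_slices row i (PySem.Int.mod v 2) hilen

-- both outer append-folds are maps of their row transforms
lemma foldA_eq_map (matrix : List (List Int)) :
    replace_min_elements matrix = matrix.map pvRowA := by
  unfold replace_min_elements
  rw [PySem.List.foldl_append_singleton_eq_map]
  simp

lemma foldB_eq_map (matrix : List (List Int)) :
    replace_min_elements_alt matrix = matrix.map (fun row =>
      PySem.List.slice row none (some (((pvArgmin row 0 row.length).2 : Nat) : Int))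
        ++ [PySem.Int.mod (pvArgmin row 0 row.length).1 2]
        ++ PySem.List.slice row (some ((((pvArgmin row 0 row.length).2 : Nat) : Int) + 1)) none) := by
  unfold replace_min_elements_alt
  rw [PySem.List.foldl_append_singleton_eq_map]
  simp

-- ===== VERDICT (by name: the statement is the Claim_ definition above) =====
theorem replace_min_elements_spec : Claim_equal_replace_min_elements := by
  intro matrix _ hpre
  unfold Spec_replace_min_elements
  rw [foldA_eq_map, foldB_eq_map]
  exact List.map_congr_left (fun row hrow => row_eq row (hpre row hrow))
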